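-- pv_equiv track=rewrite | github.com/manwar/perlweeklychallenge-club | challenge-265/roger-bell-west/python/ch-2.py | completingword
-- ===== SOURCE A (Python) =====
-- from collections import defaultdict
--
-- def str2hash(a):
--   m = defaultdict(lambda: 0)
--   for c in a:
--     if c.isalpha():
--       m[c.lower()] += 1
--   return m
--
-- def completingword(a, cw):
--   ah = str2hash(a)
--   out = []
--   for t in cw:
--     valid = True
--     th = str2hash(t)
--     for k, v in ah.items():
--       if k not in th:
--         valid = False
--         break
--       if th[k] < v:
--         valid = False
--         break
--     if valid:
--       out.append(t)
--   if len(out) == 0: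
--     return ""
--   out.sort(key = lambda i: len(i))
--   return out[0]
-- ===== SOURCE B (Python) =====
-- def _sig(s):
--     return sorted(c.lower() for c in s if c.isalpha())
--
--
-- def _covers(need, have):
--     # need and have are sorted letter lists; greedy merge scan:
--     # need is a sub-multiset of have iff every need letter is matched in order.
--     i = 0
--     for h in have:
--         if i < len(need) and need[i] == h:
--             i += 1
--     return i == len(need)
--
--
-- def completingword(a, cw):
--     need = _sig(a)
--     for t in sorted(cw, key=len):
--         if _covers(need, _sig(t)):
--             return t
--     return ""
-- ===== Notes on version B (the rewrite author's own statement) =====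
-- stated objective: alternative
-- what changed: B drops A's per-word letter dictionaries and collect-then-sort selection entirely: it represents the plate and each word as a sorted lowercase-letter signature list, sorts the words by length once up front, and returns the first word (in that length order) whose signature contains the plate's signature, tested by a greedy two-pointer merge scan over the two sorted lists.
import Mathlib
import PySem

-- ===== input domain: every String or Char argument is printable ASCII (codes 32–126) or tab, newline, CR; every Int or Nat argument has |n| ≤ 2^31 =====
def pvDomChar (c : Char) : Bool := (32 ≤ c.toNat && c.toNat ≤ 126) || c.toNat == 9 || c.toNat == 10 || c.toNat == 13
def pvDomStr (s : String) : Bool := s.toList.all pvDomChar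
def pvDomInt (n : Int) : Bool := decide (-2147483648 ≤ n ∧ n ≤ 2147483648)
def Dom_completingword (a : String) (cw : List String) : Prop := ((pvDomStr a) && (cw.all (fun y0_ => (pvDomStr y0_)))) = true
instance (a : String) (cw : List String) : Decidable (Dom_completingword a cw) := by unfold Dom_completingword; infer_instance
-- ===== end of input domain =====

-- B replaces A's per-word letter dictionaries and collect-valid-then-sort selection with sorted
-- letter-signature lists, one up-front length sort of the words, and a greedy two-pointer
-- containment scan returning the first match; objective: alternative (same value, no dictionaries).

-- ===== PORT A =====
def pvStr2hash (s : String) : PySem.Dict Char Int :=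
  s.toList.foldl
    (fun m c => if PySem.Chars.isalpha c then m.modify (PySem.Chars.lowerChar c) 0 (· + 1) else m)
    PySem.Dict.empty

def completingword (a : String) (cw : List String) : String :=
  let ah := pvStr2hash a
  let out := cw.foldl (fun out t =>
    let th := pvStr2hash t
    -- the Python inner loop with its two breaks computes exactly this conjunction over ah.items
    let valid := ah.items.all (fun kv => th.contains kv.1 && !(decide (th.getD kv.1 0 < kv.2)))
    if valid then out ++ [t] else out) []
  if out.length = 0 then ""
  else PySem.List.pyGetD (PySem.List.sorted out (fun i => PySem.Str.len i) false) 0 ""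

-- ===== PORT B =====
-- _sig: sorted lowercase letter list of a string
def pvSig (s : String) : List Char :=
  PySem.List.sorted ((s.toList.filter PySem.Chars.isalpha).map PySem.Chars.lowerChar)
    (fun c => c) false

-- _covers: greedy two-pointer scan; i walks through `need` as its letters are matched in `hv`
def pvCovers (need hv : List Char) : Bool :=
  (hv.foldl
    (fun i h =>
      if i < (need.length : Int) ∧ PySem.List.pyGetD need i 'a' = h then i + 1 else i)
    (0 : Int)) == (need.length : Int)

def completingword_alt (a : String) (cw : List String) : String :=
  let need := pvSig a
  ((PySem.List.sorted cw (fun t => PySem.Str.len t) false).find?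
      (fun t => pvCovers need (pvSig t))).getD ""

-- ===== PRECONDITION & SPEC =====
def Spec_completingword (a : String) (cw : List String) (out : String) : Prop := out = completingword_alt a cw
instance (a : String) (cw : List String) (out : String) : Decidable (Spec_completingword a cw out) := by unfold Spec_completingword; infer_instance

-- ===== CLAIM (what is proved, stated in full; the proofs are below) =====
def Claim_equal_completingword : Prop := ∀ (a : String) (cw : List String), Dom_completingword a cw → Spec_completingword a cw (completingword a cw)

-- ===== LEMMAS AND PROOFS =====

def pvLetters (s : String) : List Char :=
  (s.toList.filter PySem.Chars.isalpha).map PySem.Chars.lowerChar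

theorem pvSig_eq (s : String) :
    pvSig s = PySem.List.sorted (pvLetters s) (fun c => c) false := rfl

-- recursive form of the greedy two-pointer scan, used only by the proofs
def pvCoversR : List Char → List Char → Bool
  | [], _ => true
  | _ :: _, [] => false
  | n :: ns, h :: hs => if n = h then pvCoversR ns hs else pvCoversR (n :: ns) hs

-- A's per-string letter histogram IS Counter of the filtered, lowercased character list.
theorem pvStr2hash_eq_counter (s : String) :
    pvStr2hash s = PySem.Dict.counter (pvLetters s) := by
  rw [pvStr2hash, pvLetters, PySem.Dict.counter_eq_foldl, List.foldl_map,
    ← PySem.List.foldl_if_eq_foldl_filter]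

-- A's dict-containment test says: every letter count of the plate is covered by the word.
theorem pvA_test_iff (a t : String) :
    ((pvStr2hash a).items.all (fun kv =>
        (pvStr2hash t).contains kv.1 && !(decide ((pvStr2hash t).getD kv.1 0 < kv.2)))) = true
      ↔ ∀ c : Char, (pvLetters a).count c ≤ (pvLetters t).count c := by
  rw [pvStr2hash_eq_counter, pvStr2hash_eq_counter, List.all_eq_true]
  constructor
  · intro h c
    by_cases hc : c ∈ pvLetters a
    · have hm : (c, ((pvLetters a).count c : Int)) ∈ (PySem.Dict.counter (pvLetters a)).items := by
        rw [PySem.Dict.items_counter]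
        exact List.mem_map.mpr ⟨c, (PySem.Set.mem_ofList _ _).mpr hc, rfl⟩
      have h2 := h _ hm
      simp only [Bool.and_eq_true, Bool.not_eq_true', decide_eq_false_iff_not, not_lt,
        PySem.Dict.getD_counter] at h2
      exact_mod_cast h2.2
    · simp [List.count_eq_zero_of_not_mem hc]
  · intro h kv hm
    rw [PySem.Dict.items_counter] at hm
    obtain ⟨k, hk, hkv⟩ := List.mem_map.mp hm
    subst hkv
    have hmem : k ∈ pvLetters a := (PySem.Set.mem_ofList _ _).mp hk
    have hpos : 0 < (pvLetters a).count k := List.count_pos_iff.mpr hmem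
    have hle := h k
    have hmemt : k ∈ pvLetters t := List.count_pos_iff.mp (by omega)
    simp only [Bool.and_eq_true, Bool.not_eq_true', decide_eq_false_iff_not, not_lt,
      PySem.Dict.contains_counter, PySem.Dict.getD_counter]
    exact ⟨List.contains_iff_mem.mpr hmemt, by exact_mod_cast hle⟩

-- the foldl two-pointer loop computes the recursive greedy scan
theorem pvCovers_loop (need : List Char) : ∀ (hv : List Char) (i : Nat), i ≤ need.length →
    ((hv.foldl
        (fun i h =>
          if i < (need.length : Int) ∧ PySem.List.pyGetD need i 'a' = h then i + 1 else i)
        (i : Int)) == (need.length : Int)) = pvCoversR (need.drop i) hv := by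
  intro hv
  induction hv with
  | nil =>
    intro i hle
    rcases Nat.lt_or_ge i need.length with hlt | hge
    · have hd : need.drop i = need[i] :: need.drop (i + 1) :=
        (List.drop_eq_getElem_cons hlt).symm ▸ rfl
      rw [List.foldl_nil, hd]
      simp [pvCoversR]
      omega
    · have hi : i = need.length := le_antisymm hle hge
      subst hi
      simp [pvCoversR, List.drop_length]
  | cons h hs ih =>
    intro i hle
    rw [List.foldl_cons]
    rcases Nat.lt_or_ge i need.length with hlt | hge
    · have hget : PySem.List.pyGetD need (i : Int) 'a' = need[i] := by
        simp [List.getD_eq_getElem?_getD, List.getElem?_eq_getElem hlt]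
      have hd : need.drop i = need[i] :: need.drop (i + 1) :=
        (List.drop_eq_getElem_cons hlt).symm ▸ rfl
      rw [hget, hd]
      by_cases hnh : need[i] = h
      · rw [if_pos ⟨by exact_mod_cast hlt, hnh⟩]
        have hcast : ((i : Int) + 1) = ((i + 1 : Nat) : Int) := by push_cast; ring
        rw [hcast, ih (i + 1) hlt]
        simp [pvCoversR, hnh]
      · rw [if_neg (by simp [hnh]), ih i hle]
        simp [pvCoversR, hnh]
    · have hi : i = need.length := le_antisymm hle hge
      subst hi
      rw [if_neg (by simp), ih _ hle]
      simp [pvCoversR, List.drop_length]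

theorem pvCovers_eq_coversR (need hv : List Char) :
    pvCovers need hv = pvCoversR need hv := by
  have := pvCovers_loop need hv 0 (Nat.zero_le _)
  simpa [pvCovers] using this

-- the greedy scan decides the subsequence relation
theorem pvCoversR_iff_sublist (hv need : List Char) :
    pvCoversR need hv = true ↔ need.Sublist hv := by
  induction hv generalizing need with
  | nil => cases need <;> simp [pvCoversR]
  | cons h hs ih =>
    cases need with
    | nil => simp [pvCoversR]
    | cons n ns =>
      by_cases he : n = h
      · subst he
        simp [pvCoversR, ih]
      · simp only [pvCoversR, if_neg he, ih]
        constructor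
        · exact fun hs' => hs'.cons h
        · intro hsub
          cases hsub with
          | cons _ h' => exact h'
          | cons₂ => exact absurd rfl he

-- on sorted lists, subsequence = sub-multiset
theorem pvSorted_sublist_iff_count (ns hs : List Char)
    (h1 : ns.Pairwise (· ≤ ·)) (h2 : hs.Pairwise (· ≤ ·)) :
    ns.Sublist hs ↔ ∀ c : Char, ns.count c ≤ hs.count c := by
  constructor
  · intro h c; exact h.count_le c
  · intro h
    exact List.sublist_of_subperm_of_pairwise
      (List.subperm_ext_iff.mpr fun x _ => h x) h1 h2

theorem pvB_test_iff (a t : String) :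
    pvCovers (pvSig a) (pvSig t) = true
      ↔ ∀ c : Char, (pvLetters a).count c ≤ (pvLetters t).count c := by
  have hca : ∀ c : Char, (pvSig a).count c = (pvLetters a).count c := fun c => by
    rw [pvSig_eq]; exact (PySem.List.sorted_perm (pvLetters a) (fun c => c) false).count_eq c
  have hct : ∀ c : Char, (pvSig t).count c = (pvLetters t).count c := fun c => by
    rw [pvSig_eq]; exact (PySem.List.sorted_perm (pvLetters t) (fun c => c) false).count_eq c
  rw [pvCovers_eq_coversR, pvCoversR_iff_sublist,
    pvSorted_sublist_iff_count _ _
      (by simpa using PySem.List.sorted_pairwise (pvLetters a) (fun c => c))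
      (by simpa using PySem.List.sorted_pairwise (pvLetters t) (fun c => c))]
  exact forall_congr' fun c => by rw [hca c, hct c]

-- one step of the stable insertion sort
theorem pvInsertBy_cons {α : Type} (blt : α → α → Bool) (x h : α) (t : List α) :
    PySem.List.insertBy blt x (h :: t) =
      if blt x h then x :: h :: t else h :: PySem.List.insertBy blt x t := by
  simp [PySem.List.insertBy]

theorem pvFilter_insertBy_neg {α : Type} (blt : α → α → Bool) (p : α → Bool) (x : α)
    (l : List α) (hx : p x = false) :
    (PySem.List.insertBy blt x l).filter p = l.filter p := by
  induction l with
  | nil => simp [PySem.List.insertBy, hx]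
  | cons h rest ih =>
    rw [pvInsertBy_cons]
    by_cases hb : blt x h
    · simp [hb, List.filter_cons, hx]
    · simp only [Bool.not_eq_true] at hb
      simp [hb, List.filter_cons, ih]

theorem pvFilter_insertBy_pos {α κ : Type} [LinearOrder κ] (key : α → κ) (p : α → Bool) (x : α)
    (l : List α) (hx : p x = true) (hs : l.Pairwise (fun a b => key a ≤ key b)) :
    (PySem.List.insertBy (fun a b => decide (key a < key b)) x l).filter p
      = PySem.List.insertBy (fun a b => decide (key a < key b)) x (l.filter p) := by
  induction l with
  | nil => simp [PySem.List.insertBy, hx]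
  | cons h rest ih =>
    rw [List.pairwise_cons] at hs
    obtain ⟨hhd, hrest⟩ := hs
    rw [pvInsertBy_cons]
    by_cases hb : key x < key h
    · rw [if_pos (by simpa using hb), List.filter_cons_of_pos hx]
      cases hf : (h :: rest).filter p with
      | nil => simp [PySem.List.insertBy]
      | cons e l'' =>
        have he : e ∈ (h :: rest).filter p := by rw [hf]; exact List.mem_cons_self
        have hmem : e ∈ h :: rest := List.mem_of_mem_filter he
        have hke : key x < key e := by
          rcases List.mem_cons.mp hmem with rfl | hmem'
          · exact hb
          · exact lt_of_lt_of_le hb (hhd e hmem')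
        rw [pvInsertBy_cons, if_pos (by simpa using hke)]
    · rw [if_neg (by simpa using hb)]
      by_cases hph : p h
      · rw [List.filter_cons_of_pos hph, List.filter_cons_of_pos hph, pvInsertBy_cons,
          if_neg (by simpa using hb), ih hrest]
      · rw [List.filter_cons_of_neg (by simpa using hph),
          List.filter_cons_of_neg (by simpa using hph), ih hrest]

-- invariant form: filtering commutes with the insertion-sort fold over a sorted accumulator
theorem pvFoldl_ins_filter {α κ : Type} [LinearOrder κ] (key : α → κ) (p : α → Bool) :
    ∀ (l l₀ : List α),
      ((l.foldl (fun acc x => PySem.List.insertBy (fun a b => decide (key a < key b)) x acc)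
          (PySem.List.sorted l₀ key false)).filter p)
        = (l.filter p).foldl
            (fun acc x => PySem.List.insertBy (fun a b => decide (key a < key b)) x acc)
            ((PySem.List.sorted l₀ key false).filter p) := by
  intro l
  induction l with
  | nil => intro l₀; simp
  | cons x l' ih =>
    intro l₀
    have hS : PySem.List.insertBy (fun a b => decide (key a < key b)) x
        (PySem.List.sorted l₀ key false) = PySem.List.sorted (l₀ ++ [x]) key false := by
      rw [PySem.List.sorted_eq_foldl_insertBy, PySem.List.sorted_eq_foldl_insertBy,
        List.foldl_append]
      rfl
    rw [List.foldl_cons, List.filter_cons, hS, ih (l₀ ++ [x])]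
    by_cases hx : p x
    · simp only [hx, if_true, List.foldl_cons]
      congr 1
      rw [← hS, pvFilter_insertBy_pos key p x _ hx (PySem.List.sorted_pairwise l₀ key)]
    · simp only [hx, Bool.false_eq_true, if_false]
      congr 1
      rw [← hS, pvFilter_insertBy_neg _ p x _ (by simpa using hx)]

-- filter commutes with the stable insertion sort
theorem pvFilter_sorted {α κ : Type} [LinearOrder κ] (p : α → Bool) (key : α → κ) (l : List α) :
    (PySem.List.sorted l key false).filter p = PySem.List.sorted (l.filter p) key false := by
  have := pvFoldl_ins_filter key p l []
  simpa [PySem.List.sorted_eq_foldl_insertBy] using this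

theorem pvFind_eq_head_filter {α : Type} (p : α → Bool) (l : List α) :
    l.find? p = (l.filter p).head? := Eq.symm List.head?_filter

theorem pvGetD_zero_eq_head {α : Type} (l : List α) (d : α) : l.getD 0 d = l.head?.getD d := by
  cases l <;> rfl

-- ===== VERDICT (by name: the statement is the Claim_ definition above) =====
theorem completingword_spec : Claim_equal_completingword := by
  intro a cw _
  unfold Spec_completingword completingword completingword_alt
  simp only []
  have hpred : (fun t => (pvStr2hash a).items.all (fun kv =>
        (pvStr2hash t).contains kv.1 && !(decide ((pvStr2hash t).getD kv.1 0 < kv.2))))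
      = (fun t => pvCovers (pvSig a) (pvSig t)) := by
    funext t
    exact Bool.eq_iff_iff.mpr ((pvA_test_iff a t).trans (pvB_test_iff a t).symm)
  rw [PySem.List.foldl_append_if_eq_filter
      (p := fun t => (pvStr2hash a).items.all (fun kv =>
        (pvStr2hash t).contains kv.1 && !(decide ((pvStr2hash t).getD kv.1 0 < kv.2)))),
    hpred, pvFind_eq_head_filter, pvFilter_sorted]
  simp only [List.nil_append]
  cases hfe : cw.filter (fun t => pvCovers (pvSig a) (pvSig t)) with
  | nil =>
    have hnil : ∀ key : String → Int, PySem.List.sorted ([] : List String) key false = [] :=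
      fun key => (PySem.List.sorted_eq_nil_iff _ _ _).mpr rfl
    simp [hnil]
  | cons o os =>
    simp only [List.length_cons, Nat.succ_ne_zero, if_false, PySem.List.pyGetD_zero]
    exact pvGetD_zero_eq_head _ ""
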